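-- pv_equiv track=rewrite | github.com/shiromofufactory/pyxel-tracker | system/wav_export.py | _count_note_steps
-- ===== SOURCE A (Python) =====
-- def _count_note_steps(notes):
--     if notes is None:
--         return 0
--     if isinstance(notes, (list, tuple)):
--         return len(notes)
--     if not isinstance(notes, str):
--         return 0
--     count = 0
--     idx = 0
--     while idx < len(notes):
--         c = notes[idx].lower()
--         if c in (" ", ",", "\t", "\n"):
--             idx += 1
--             continue
--         if c == "r":
--             count += 1
--             idx += 1
--             continue
--         if c in ("c", "d", "e", "f", "g", "a", "b"):
--             idx += 1
--             if idx < len(notes) and notes[idx] == "#":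
--                 idx += 1
--             while idx < len(notes) and notes[idx].isdigit():
--                 idx += 1
--             count += 1
--             continue
--         # Unknown char: skip it without counting a note.
--         idx += 1
--     return count
-- ===== SOURCE B (Python) =====
-- def _count_note_steps(notes):
--     if notes is None:
--         return 0
--     if isinstance(notes, (list, tuple)):
--         return len(notes)
--     if not isinstance(notes, str):
--         return 0
--     return sum(1 for c in notes if c.lower() in "rcdefgab")
-- ===== Notes on version B (the rewrite author's own statement) =====
-- stated objective: simpler
-- what changed: Replaced the idx-based while-loop parser (with nested '#'/digit consumption) by a single filter-count of note-letter characters, which is exact because consumed '#'/digit characters and skipped whitespace/unknown characters never contribute to the count.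
import Mathlib
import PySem

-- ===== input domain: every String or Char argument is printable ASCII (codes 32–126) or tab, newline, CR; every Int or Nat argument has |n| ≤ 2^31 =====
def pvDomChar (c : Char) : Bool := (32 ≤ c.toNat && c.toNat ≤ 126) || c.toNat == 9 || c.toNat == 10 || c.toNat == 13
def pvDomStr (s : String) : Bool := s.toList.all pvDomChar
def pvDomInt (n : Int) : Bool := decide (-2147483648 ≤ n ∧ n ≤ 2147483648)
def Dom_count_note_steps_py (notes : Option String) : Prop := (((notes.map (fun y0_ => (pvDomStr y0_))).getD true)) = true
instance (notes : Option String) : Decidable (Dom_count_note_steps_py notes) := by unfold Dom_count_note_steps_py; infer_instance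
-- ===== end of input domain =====

-- B replaces A's index-based parser loop (with nested '#'/digit consumption) by a
-- single filter-count of note-letter characters; objective: simpler, same result.

-- ===== PORT A =====
-- 'while idx < len(notes) and notes[idx].isdigit(): idx += 1' on the remaining chars
def pvSkipDigits : List Char → List Char
  | [] => []
  | c :: rest => if PySem.Chars.isdigit c then pvSkipDigits rest else c :: rest

-- 'if idx < len(notes) and notes[idx] == "#": idx += 1' on the remaining chars
def pvSkipHash : List Char → List Char
  | [] => []
  | c :: rest => if c = '#' then rest else c :: rest

theorem pvSkipDigits_length_le (l : List Char) : (pvSkipDigits l).length ≤ l.length := by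
  induction l with
  | nil => simp [pvSkipDigits]
  | cons c rest ih =>
    simp only [pvSkipDigits]
    split
    · exact Nat.le_trans ih (Nat.le_succ _)
    · simp

theorem pvSkipHash_length_le (l : List Char) : (pvSkipHash l).length ≤ l.length := by
  cases l with
  | nil => simp [pvSkipHash]
  | cons c rest =>
    simp only [pvSkipHash]
    split
    · exact Nat.le_succ _
    · simp

-- the while loop of A, as structural recursion on the remaining characters
def pvLoopA : List Char → Int
  | [] => 0
  | c :: rest =>
    -- c = notes[idx].lower()
    if PySem.Chars.lowerChar c = ' ' ∨ PySem.Chars.lowerChar c = ',' ∨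
       PySem.Chars.lowerChar c = '\t' ∨ PySem.Chars.lowerChar c = '\n' then
      pvLoopA rest
    else if PySem.Chars.lowerChar c = 'r' then
      1 + pvLoopA rest
    else if PySem.Chars.lowerChar c = 'c' ∨ PySem.Chars.lowerChar c = 'd' ∨
            PySem.Chars.lowerChar c = 'e' ∨ PySem.Chars.lowerChar c = 'f' ∨
            PySem.Chars.lowerChar c = 'g' ∨ PySem.Chars.lowerChar c = 'a' ∨
            PySem.Chars.lowerChar c = 'b' then
      1 + pvLoopA (pvSkipDigits (pvSkipHash rest))
    else
      pvLoopA rest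
  termination_by l => l.length
  decreasing_by
    · simp
    · simp
    · calc (pvSkipDigits (pvSkipHash rest)).length
          ≤ (pvSkipHash rest).length := pvSkipDigits_length_le _
        _ ≤ rest.length := pvSkipHash_length_le _
        _ < rest.length + 1 := Nat.lt_succ_self _
    · simp

def count_note_steps_py (notes : Option String) : Int :=
  match notes with
  | none => 0
  | some s => pvLoopA s.toList

-- ===== PORT B =====
-- the generator sum: sum(1 for c in notes if c.lower() in "rcdefgab")
def pvSumB : List Char → Int
  | [] => 0
  | c :: rest =>
    (if PySem.Chars.isIn [PySem.Chars.lowerChar c] "rcdefgab".toList then (1 : Int) else 0)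
      + pvSumB rest

def count_note_steps_py_alt (notes : Option String) : Int :=
  match notes with
  | none => 0
  | some s => pvSumB s.toList

-- ===== PRECONDITION & SPEC =====
def Spec_count_note_steps_py (notes : Option String) (out : Int) : Prop := out = count_note_steps_py_alt notes
instance (notes : Option String) (out : Int) : Decidable (Spec_count_note_steps_py notes out) := by unfold Spec_count_note_steps_py; infer_instance

-- ===== CLAIM (what is proved, stated in full; the proofs are below) =====
def Claim_equal_count_note_steps_py : Prop := ∀ (notes : Option String), Dom_count_note_steps_py notes → Spec_count_note_steps_py notes (count_note_steps_py notes)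

-- ===== LEMMAS AND PROOFS =====

-- B's per-character condition, in a handy form
def pvIsNote (c : Char) : Bool :=
  PySem.Chars.isIn [PySem.Chars.lowerChar c] "rcdefgab".toList

theorem pvSumB_cons (c : Char) (rest : List Char) :
    pvSumB (c :: rest) = (if pvIsNote c then 1 else 0) + pvSumB rest := by
  simp [pvSumB, pvIsNote]

theorem pvSumB_skipHash (l : List Char) : pvSumB (pvSkipHash l) = pvSumB l := by
  cases l with
  | nil => rfl
  | cons c rest =>
    simp only [pvSkipHash]
    split
    · rename_i h
      subst h
      rw [pvSumB_cons]
      have : pvIsNote '#' = false := by decide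
      simp [this]
    · rfl

theorem pvIsNote_mem (c : Char) :
    pvIsNote c = true ↔ PySem.Chars.lowerChar c ∈ ['r', 'c', 'd', 'e', 'f', 'g', 'a', 'b'] := by
  unfold pvIsNote
  rw [show "rcdefgab".toList = ['r', 'c', 'd', 'e', 'f', 'g', 'a', 'b'] from rfl,
      PySem.Chars.isIn_iff_infix]
  exact List.singleton_infix_iff _ _

theorem pvIsNote_of_digit (c : Char) (h : PySem.Chars.isdigit c = true) :
    pvIsNote c = false := by
  simp only [PySem.Chars.isdigit, Bool.and_eq_true, decide_eq_true_eq] at h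
  have hu : PySem.Chars.isupper c = false := by
    simp only [PySem.Chars.isupper]
    have : ¬ ('A' ≤ c) := fun hA => absurd (le_trans hA h.2) (by decide)
    simp [this]
  have hl : PySem.Chars.lowerChar c = c := by simp [PySem.Chars.lowerChar, hu]
  rw [Bool.eq_false_iff]
  intro hnote
  rw [pvIsNote_mem, hl] at hnote
  simp only [List.mem_cons, List.not_mem_nil, or_false] at hnote
  rcases hnote with rfl | rfl | rfl | rfl | rfl | rfl | rfl | rfl <;> revert h <;> decide

theorem pvSumB_skipDigits (l : List Char) : pvSumB (pvSkipDigits l) = pvSumB l := by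
  induction l with
  | nil => rfl
  | cons c rest ih =>
    simp only [pvSkipDigits]
    split
    · rename_i h
      rw [ih, pvSumB_cons, pvIsNote_of_digit c h]
      simp
    · rfl

theorem pvLoopA_eq_pvSumB (l : List Char) : pvLoopA l = pvSumB l := by
  induction l using pvLoopA.induct with
  | case1 => simp [pvLoopA, pvSumB]
  | case2 c rest h ih =>
    rw [pvLoopA, if_pos h, ih, pvSumB_cons]
    have hf : pvIsNote c = false := by
      rw [Bool.eq_false_iff]
      intro hnote
      rw [pvIsNote_mem] at hnote
      rcases h with h | h | h | h <;> rw [h] at hnote <;> revert hnote <;> decide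
    simp [hf]
  | case3 c rest h1 h2 ih =>
    rw [pvLoopA, if_neg h1, if_pos h2, ih, pvSumB_cons]
    have ht : pvIsNote c = true := by rw [pvIsNote_mem, h2]; decide
    simp [ht]
  | case4 c rest h1 h2 h3 ih =>
    rw [pvLoopA, if_neg h1, if_neg h2, if_pos h3, ih, pvSumB_skipDigits, pvSumB_skipHash,
        pvSumB_cons]
    have ht : pvIsNote c = true := by
      rw [pvIsNote_mem]
      rcases h3 with h | h | h | h | h | h | h <;> rw [h] <;> decide
    simp [ht]
  | case5 c rest h1 h2 h3 ih =>
    rw [pvLoopA, if_neg h1, if_neg h2, if_neg h3, ih, pvSumB_cons]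
    have hf : pvIsNote c = false := by
      rw [Bool.eq_false_iff]
      intro hnote
      rw [pvIsNote_mem] at hnote
      simp only [List.mem_cons, List.not_mem_nil, or_false] at hnote
      tauto
    simp [hf]

-- ===== VERDICT (by name: the statement is the Claim_ definition above) =====
theorem count_note_steps_py_spec : Claim_equal_count_note_steps_py := by
  intro notes _
  unfold Spec_count_note_steps_py count_note_steps_py count_note_steps_py_alt
  cases notes with
  | none => rfl
  | some s => exact pvLoopA_eq_pvSumB s.toList
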